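-- pv_equiv track=rewrite | github.com/michalambro89/Computational_Geometry_Uni | GO_project_3/PointLocationApp.py | if_in_bounding_rectangle
-- ===== SOURCE A (Python) =====
-- def if_in_bounding_rectangle(figure_points, x, y):
--     min_x = min([point[0] for point in figure_points])
--     max_x = max([point[0] for point in figure_points])
--     min_y = min([point[1] for point in figure_points])
--     max_y = max([point[1] for point in figure_points])
--
--     if min_x <= x <= max_x and min_y <= y <= max_y:
--         return True
--     else:
--         return False
-- ===== SOURCE B (Python) =====
-- def if_in_bounding_rectangle(figure_points, x, y):
--     # (x, y) lies in the bounding rectangle iff on each axis some point is on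
--     # each side of it: min_x <= x iff some px <= x, x <= max_x iff some px >= x, etc.
--     # No extremes are ever computed; each any() short-circuits.
--     return (any(px <= x for px, _ in figure_points)
--             and any(x <= px for px, _ in figure_points)
--             and any(py <= y for _, py in figure_points)
--             and any(y <= py for _, py in figure_points))
-- ===== Notes on version B (the rewrite author's own statement) =====
-- stated objective: alternative
-- what changed: B never computes the bounding box: it tests containment directly by four short-circuiting existential tests (some point on each side of (x,y) per axis), equivalent to the min/max bounds test on nonempty input.
import Mathlib
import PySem

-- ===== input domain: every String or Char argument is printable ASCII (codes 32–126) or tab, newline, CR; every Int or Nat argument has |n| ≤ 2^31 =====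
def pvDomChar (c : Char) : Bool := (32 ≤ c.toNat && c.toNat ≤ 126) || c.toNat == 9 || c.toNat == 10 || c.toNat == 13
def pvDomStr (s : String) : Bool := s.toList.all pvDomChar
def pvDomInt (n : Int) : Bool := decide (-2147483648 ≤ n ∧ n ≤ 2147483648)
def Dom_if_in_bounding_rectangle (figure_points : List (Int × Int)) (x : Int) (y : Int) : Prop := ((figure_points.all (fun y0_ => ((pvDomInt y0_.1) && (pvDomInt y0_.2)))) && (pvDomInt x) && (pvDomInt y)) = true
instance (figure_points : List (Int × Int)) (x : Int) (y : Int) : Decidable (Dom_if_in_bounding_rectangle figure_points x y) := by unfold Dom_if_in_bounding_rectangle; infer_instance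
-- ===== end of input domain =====

-- B never computes the bounding box: containment is tested by four short-circuiting
-- existential scans (some point on each side of (x, y) per axis). Same O(n); not timed faster.
-- Pre_ excludes the empty list, on which A raises ValueError (min() of empty sequence).


-- ===== PORT A =====
-- min([point[0] for point in figure_points]) etc.; none = empty list = Python ValueError (outside Pre_)
def if_in_bounding_rectangle (figure_points : List (Int × Int)) (x : Int) (y : Int) : Bool :=
  match PySem.List.min? (figure_points.map (fun p => p.1)) (fun v => v),
        PySem.List.max? (figure_points.map (fun p => p.1)) (fun v => v),
        PySem.List.min? (figure_points.map (fun p => p.2)) (fun v => v),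
        PySem.List.max? (figure_points.map (fun p => p.2)) (fun v => v) with
  | some min_x, some max_x, some min_y, some max_y =>
      if min_x ≤ x ∧ x ≤ max_x ∧ min_y ≤ y ∧ y ≤ max_y then true else false
  | _, _, _, _ => false

-- ===== PORT B =====
-- four any(...) existential tests, one per side of the point, short-circuited by &&
def if_in_bounding_rectangle_alt (figure_points : List (Int × Int)) (x : Int) (y : Int) : Bool :=
  figure_points.any (fun p => decide (p.1 ≤ x)) &&
  figure_points.any (fun p => decide (x ≤ p.1)) &&
  figure_points.any (fun p => decide (p.2 ≤ y)) &&
  figure_points.any (fun p => decide (y ≤ p.2))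

-- ===== PRECONDITION & SPEC =====
-- Pre_: A raises ValueError on the empty list (min() of an empty sequence)
def Pre_if_in_bounding_rectangle (figure_points : List (Int × Int)) (x : Int) (y : Int) : Prop :=
  figure_points ≠ []
instance (figure_points : List (Int × Int)) (x : Int) (y : Int) : Decidable (Pre_if_in_bounding_rectangle figure_points x y) := by unfold Pre_if_in_bounding_rectangle; infer_instance

def pvWitness_if_in_bounding_rectangle : (List (Int × Int)) × Int × Int := ([(0, 0), (4, 3)], 2, 1)

def Spec_if_in_bounding_rectangle (figure_points : List (Int × Int)) (x : Int) (y : Int) (out : Bool) : Prop := out = if_in_bounding_rectangle_alt figure_points x y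
instance (figure_points : List (Int × Int)) (x : Int) (y : Int) (out : Bool) : Decidable (Spec_if_in_bounding_rectangle figure_points x y out) := by unfold Spec_if_in_bounding_rectangle; infer_instance

-- ===== CLAIM (what is proved, stated in full; the proofs are below) =====
def Claim_equal_if_in_bounding_rectangle : Prop := ∀ (figure_points : List (Int × Int)) (x : Int) (y : Int), Dom_if_in_bounding_rectangle figure_points x y → Pre_if_in_bounding_rectangle figure_points x y → Spec_if_in_bounding_rectangle figure_points x y (if_in_bounding_rectangle figure_points x y)

-- ===== LEMMAS AND PROOFS =====
-- running minimum is ≤ x iff some element (or the seed) is ≤ x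
theorem foldl_min_le (l : List Int) (a x : Int) :
    l.foldl min a ≤ x ↔ a ≤ x ∨ ∃ b ∈ l, b ≤ x := by
  induction l generalizing a with
  | nil => simp
  | cons h t ih =>
      simp only [List.foldl_cons, ih, min_le_iff, List.mem_cons]
      constructor
      · rintro (h' | ⟨b, hb, hbx⟩)
        · rcases h' with h' | h'
          · exact Or.inl h'
          · exact Or.inr ⟨h, Or.inl rfl, h'⟩
        · exact Or.inr ⟨b, Or.inr hb, hbx⟩
      · rintro (h' | ⟨b, hb | hb, hbx⟩)
        · exact Or.inl (Or.inl h')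
        · exact Or.inl (Or.inr (hb ▸ hbx))
        · exact Or.inr ⟨b, hb, hbx⟩

-- running maximum is ≥ x iff some element (or the seed) is ≥ x
theorem foldl_max_ge (l : List Int) (a x : Int) :
    x ≤ l.foldl max a ↔ x ≤ a ∨ ∃ b ∈ l, x ≤ b := by
  induction l generalizing a with
  | nil => simp
  | cons h t ih =>
      simp only [List.foldl_cons, ih, le_max_iff, List.mem_cons]
      constructor
      · rintro (h' | ⟨b, hb, hbx⟩)
        · rcases h' with h' | h'
          · exact Or.inl h'
          · exact Or.inr ⟨h, Or.inl rfl, h'⟩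
        · exact Or.inr ⟨b, Or.inr hb, hbx⟩
      · rintro (h' | ⟨b, hb | hb, hbx⟩)
        · exact Or.inl (Or.inl h')
        · exact Or.inl (Or.inr (hb ▸ hbx))
        · exact Or.inr ⟨b, hb, hbx⟩

theorem equal_aux (figure_points : List (Int × Int)) (x y : Int)
    (h : figure_points ≠ []) :
    if_in_bounding_rectangle figure_points x y = if_in_bounding_rectangle_alt figure_points x y := by
  match figure_points with
  | [] => exact absurd rfl h
  | p :: rest =>
      simp only [if_in_bounding_rectangle, if_in_bounding_rectangle_alt, List.map_cons,
        PySem.List.min?_id_cons, PySem.List.max?_id_cons]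
      have hmin : (rest.map Prod.fst).foldl min p.1 ≤ x ↔
          ((p :: rest).any (fun q => decide (q.1 ≤ x)) = true) := by
        rw [foldl_min_le]; simp; try tauto
      have hmax : x ≤ (rest.map Prod.fst).foldl max p.1 ↔
          ((p :: rest).any (fun q => decide (x ≤ q.1)) = true) := by
        rw [foldl_max_ge]; simp; try tauto
      have hminy : (rest.map Prod.snd).foldl min p.2 ≤ y ↔
          ((p :: rest).any (fun q => decide (q.2 ≤ y)) = true) := by
        rw [foldl_min_le]; simp; try tauto
      have hmaxy : y ≤ (rest.map Prod.snd).foldl max p.2 ↔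
          ((p :: rest).any (fun q => decide (y ≤ q.2)) = true) := by
        rw [foldl_max_ge]; simp; try tauto
      split_ifs with hc
      · symm
        simp only [Bool.and_eq_true]
        exact ⟨⟨⟨hmin.mp hc.1, hmax.mp hc.2.1⟩, hminy.mp hc.2.2.1⟩, hmaxy.mp hc.2.2.2⟩
      · symm
        rw [← Bool.not_eq_true]
        simp only [Bool.and_eq_true, not_and_or]
        by_contra hall
        push Not at hall
        exact hc ⟨hmin.mpr hall.1.1.1, hmax.mpr hall.1.1.2, hminy.mpr hall.1.2, hmaxy.mpr hall.2⟩

-- ===== VERDICT (by name: the statement is the Claim_ definition above) =====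
theorem if_in_bounding_rectangle_spec : Claim_equal_if_in_bounding_rectangle := by
  intro figure_points x y _ hpre
  exact equal_aux figure_points x y hpre
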